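-- pv_equiv track=rewrite | github.com/suhasgumma/Problem-Solving | codeForces/Round685Div2/nonSubStringSubSequence.py | isThere
-- ===== SOURCE A (Python) =====
-- def isThere(s, zeroSet, oneSet, l, r):
--     left = s[l-1]
--     right = s[r-1]
--
--     for i in range(l-1):
--         if left == '0':
--             if i in zeroSet: return "YES"
--
--         else:
--             if i in oneSet: return "YES"
--
--     for i in range(r,len(s)):
--         if right == '0':
--             if i in zeroSet: return "YES"
--         else:
--             if i in oneSet: return "YES"
--
--     return "NO"
-- ===== SOURCE B (Python) =====
-- def isThere(s, zeroSet, oneSet, l, r):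
--     # Simpler: instead of scanning every index position and testing membership,
--     # scan each set once and test whether any stored index lies in the allowed range.
--     leftSet = zeroSet if s[l-1] == '0' else oneSet
--     rightSet = zeroSet if s[r-1] == '0' else oneSet
--     n = len(s)
--     if any(0 <= x < l - 1 for x in leftSet) or any(r <= x < n for x in rightSet):
--         return "YES"
--     return "NO"
-- ===== Notes on version B (the rewrite author's own statement) =====
-- stated objective: simpler
-- what changed: A scans every index position in range(l-1) and range(r,len(s)) testing membership in the set; B instead scans each set once and checks whether any stored index falls inside the corresponding range, removing the position loops entirely.
import Mathlib
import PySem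

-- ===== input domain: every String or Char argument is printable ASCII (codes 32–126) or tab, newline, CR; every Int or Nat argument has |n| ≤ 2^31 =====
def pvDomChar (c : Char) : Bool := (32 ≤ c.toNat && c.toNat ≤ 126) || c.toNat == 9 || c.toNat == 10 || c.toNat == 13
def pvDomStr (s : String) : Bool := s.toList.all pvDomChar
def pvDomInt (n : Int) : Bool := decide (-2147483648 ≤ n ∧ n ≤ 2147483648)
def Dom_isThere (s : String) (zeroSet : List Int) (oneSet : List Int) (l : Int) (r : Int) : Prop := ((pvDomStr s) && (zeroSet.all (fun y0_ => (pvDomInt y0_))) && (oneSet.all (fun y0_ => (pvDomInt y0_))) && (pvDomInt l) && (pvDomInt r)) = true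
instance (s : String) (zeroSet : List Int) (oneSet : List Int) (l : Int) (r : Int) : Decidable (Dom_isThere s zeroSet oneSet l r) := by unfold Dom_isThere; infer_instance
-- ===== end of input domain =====

-- B replaces A's per-position scans of range(l-1) and range(r,len(s)) with one pass over each
-- set checking whether a stored index lies in the range (objective: simpler).

-- ===== PORT A =====
def isThere (s : String) (zeroSet : List Int) (oneSet : List Int) (l : Int) (r : Int) : String :=
  match PySem.Str.pyGet? s (l - 1), PySem.Str.pyGet? s (r - 1) with
  | some left, some right =>
    if (PySem.List.pyRange 0 (l - 1) 1).any (fun i =>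
        if left = '0' then zeroSet.contains i else oneSet.contains i) then "YES"
    else if (PySem.List.pyRange r (PySem.Str.len s) 1).any (fun i =>
        if right = '0' then zeroSet.contains i else oneSet.contains i) then "YES"
    else "NO"
  | _, _ => ""   -- IndexError: excluded by Pre_isThere

-- ===== PORT B =====
def isThere_alt (s : String) (zeroSet : List Int) (oneSet : List Int) (l : Int) (r : Int) : String :=
  match PySem.Str.pyGet? s (l - 1) with
  | none => ""   -- IndexError: excluded by Pre_isThere
  | some lc =>
    match PySem.Str.pyGet? s (r - 1) with
    | none => ""   -- IndexError: excluded by Pre_isThere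
    | some rc =>
      let leftSet := if lc = '0' then zeroSet else oneSet
      let rightSet := if rc = '0' then zeroSet else oneSet
      let n := PySem.Str.len s
      if leftSet.any (fun x => decide (0 ≤ x ∧ x < l - 1))
          || rightSet.any (fun x => decide (r ≤ x ∧ x < n)) then "YES"
      else "NO"

-- ===== PRECONDITION & SPEC =====
-- Pre_ excludes exactly the inputs where Python's s[l-1] or s[r-1] raises IndexError.
def Pre_isThere (s : String) (zeroSet : List Int) (oneSet : List Int) (l : Int) (r : Int) : Prop :=
  PySem.Raise.InRange s.length (l - 1) ∧ PySem.Raise.InRange s.length (r - 1)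
instance (s : String) (zeroSet : List Int) (oneSet : List Int) (l : Int) (r : Int) : Decidable (Pre_isThere s zeroSet oneSet l r) := by unfold Pre_isThere; infer_instance
def pvWitness_isThere : String × List Int × List Int × Int × Int := ("0110", [0, 3], [1], 2, 3)

def Spec_isThere (s : String) (zeroSet : List Int) (oneSet : List Int) (l : Int) (r : Int) (out : String) : Prop := out = isThere_alt s zeroSet oneSet l r
instance (s : String) (zeroSet : List Int) (oneSet : List Int) (l : Int) (r : Int) (out : String) : Decidable (Spec_isThere s zeroSet oneSet l r out) := by unfold Spec_isThere; infer_instance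

-- ===== CLAIM (what is proved, stated in full; the proofs are below) =====
def Claim_equal_isThere : Prop := ∀ (s : String) (zeroSet : List Int) (oneSet : List Int) (l : Int) (r : Int), Dom_isThere s zeroSet oneSet l r → Pre_isThere s zeroSet oneSet l r → Spec_isThere s zeroSet oneSet l r (isThere s zeroSet oneSet l r)

-- ===== LEMMAS AND PROOFS =====

-- scanning positions a..b-1 for membership in zs = scanning zs for a value in [a, b)
theorem any_pyRange_contains (a b : Int) (zs : List Int) :
    (PySem.List.pyRange a b 1).any (fun i => zs.contains i)
      = zs.any (fun x => decide (a ≤ x ∧ x < b)) := by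
  rw [Bool.eq_iff_iff]
  simp only [List.any_eq_true, PySem.List.mem_pyRange_one,
    List.contains_iff_mem, decide_eq_true_eq]
  constructor
  · rintro ⟨i, ⟨h1, h2⟩, hm⟩; exact ⟨i, hm, h1, h2⟩
  · rintro ⟨x, hm, h1, h2⟩; exact ⟨x, ⟨h1, h2⟩, hm⟩

-- ===== VERDICT (by name: the statement is the Claim_ definition above) =====
theorem isThere_spec : Claim_equal_isThere := by
  intro s zs os l r _ _
  unfold Spec_isThere isThere isThere_alt
  cases hl : PySem.Str.pyGet? s (l - 1) with
  | none => rfl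
  | some lc =>
    cases hr : PySem.Str.pyGet? s (r - 1) with
    | none => rfl
    | some rc =>
      simp only []
      by_cases h0 : lc = '0' <;> by_cases h1 : rc = '0' <;>
        simp only [h0, h1, if_pos, if_neg, if_false,
          any_pyRange_contains] <;>
        cases hA : zs.any (fun x => decide (0 ≤ x ∧ x < l - 1)) <;>
        cases hB : os.any (fun x => decide (0 ≤ x ∧ x < l - 1)) <;>
        simp_all
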